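-- pv_equiv track=rewrite | github.com/JackBmann/analysis-of-algorithms | Homework1.py | tensorDivideAndConquer
-- ===== SOURCE A (Python) =====
-- from math import floor, sqrt
--
-- def tensorDivideAndConquer(vs, num):
--     # Base case: n = 0, return the singular strings to be concatenated
--     if num == 0:
--         return vs
--     # If n is odd then there are an even number of divisions needed
--     elif num % 2 == 1:
--         temp = []
--         # Find the tensors of the num/2 iteration
--         divided = tensorDivideAndConquer(vs, floor(num / 2))
--         # Concatenate the tensors of the num/2 iteration together, add them to a list, and return the list
--         for w in divided:
--             for v in divided:
--                 temp.append(str(w) + str(v))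
--         return temp
--     # If n is even then there are an odd number of divisions need and the permutations must be divided into even parts
--     # and the tensor product must be applied one last time to the result.
--     else:
--         temp1, temp2 = [], []
--         # Find the tensors of the (num-1)/2 iteration
--         divided = tensorDivideAndConquer(vs, floor((num - 1) / 2))
--         # Concatenate the tensors of the (num-1)/2 iteration together and add them to a list
--         for w in divided:
--             for v in divided:
--                 temp1.append(str(w) + str(v))
--         # Do one last tensor product on the results because the number of divisions is odd, then return the result
--         for w in temp1:
--             for v in vs:
--                 temp2.append(str(w) + str(v))
--         return temp2
-- ===== SOURCE B (Python) =====
-- def tensorDivideAndConquer(vs, num):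
--     # iterative: start from the single-factor strings, append one factor per step
--     if num == 0:
--         return vs
--     result = [str(v) for v in vs]
--     for _ in range(num):
--         result = [w + str(v) for w in result for v in vs]
--     return result
-- ===== Notes on version B (the rewrite author's own statement) =====
-- stated objective: simpler
-- what changed: Replaces the divide-and-conquer length-doubling recursion (odd/even cases, nested self-products) with a single iterative loop that multiplies in one factor of vs per step, producing the same (num+1)-fold concatenations in the same order.
import Mathlib
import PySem

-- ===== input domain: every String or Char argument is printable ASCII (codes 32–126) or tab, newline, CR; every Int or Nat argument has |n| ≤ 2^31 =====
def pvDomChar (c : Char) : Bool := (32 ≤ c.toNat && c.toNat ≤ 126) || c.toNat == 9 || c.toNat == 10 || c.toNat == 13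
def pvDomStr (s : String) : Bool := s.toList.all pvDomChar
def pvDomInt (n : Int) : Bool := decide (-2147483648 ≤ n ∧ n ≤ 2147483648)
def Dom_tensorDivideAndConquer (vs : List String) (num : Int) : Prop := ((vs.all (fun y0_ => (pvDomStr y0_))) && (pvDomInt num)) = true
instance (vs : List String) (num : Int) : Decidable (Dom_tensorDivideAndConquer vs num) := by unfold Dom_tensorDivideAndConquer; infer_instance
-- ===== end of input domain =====

-- B replaces A's divide-and-conquer length-doubling recursion with a single iterative
-- loop multiplying in one factor of vs per step (objective: simpler, same cost).


-- ===== PORT A =====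
-- recursion on the (non-negative) recursion depth, exactly A's three branches;
-- str(·) on the string elements is the identity
def tensorDCAux (vs : List String) : Nat → List String
  | 0 => vs
  | (n+1) =>
    if (n+1) % 2 == 1 then
      let divided := tensorDCAux vs ((n+1) / 2)
      divided.foldl (fun temp w => divided.foldl (fun temp v => temp ++ [w ++ v]) temp) []
    else
      let divided := tensorDCAux vs ((n+1-1) / 2)
      let temp1 := divided.foldl (fun t w => divided.foldl (fun t v => t ++ [w ++ v]) t) []
      temp1.foldl (fun t w => vs.foldl (fun t v => t ++ [w ++ v]) t) []
  decreasing_by all_goals omega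

def tensorDivideAndConquer (vs : List String) (num : Int) : List String :=
  tensorDCAux vs num.toNat  -- for num < 0 Python never terminates; excluded by Pre_

-- ===== PORT B =====
def tensorDivideAndConquer_alt (vs : List String) (num : Int) : List String :=
  if num == 0 then vs
  else
    (List.range num.toNat).foldl
      (fun result _ => result.flatMap (fun w => vs.map (fun v => w ++ v)))
      (vs.map (fun v => v))

-- ===== PRECONDITION & SPEC =====
-- Pre_ excludes num < 0, on which Python A recurses forever (RecursionError).
def Pre_tensorDivideAndConquer (vs : List String) (num : Int) : Prop := 0 ≤ num
instance (vs : List String) (num : Int) : Decidable (Pre_tensorDivideAndConquer vs num) := by unfold Pre_tensorDivideAndConquer; infer_instance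
def pvWitness_tensorDivideAndConquer : List String × Int := (["a", "b"], 2)
def Spec_tensorDivideAndConquer (vs : List String) (num : Int) (out : List String) : Prop := out = tensorDivideAndConquer_alt vs num
instance (vs : List String) (num : Int) (out : List String) : Decidable (Spec_tensorDivideAndConquer vs num out) := by unfold Spec_tensorDivideAndConquer; infer_instance

-- ===== CLAIM (what is proved, stated in full; the proofs are below) =====
def Claim_equal_tensorDivideAndConquer : Prop := ∀ (vs : List String) (num : Int), Dom_tensorDivideAndConquer vs num → Pre_tensorDivideAndConquer vs num → Spec_tensorDivideAndConquer vs num (tensorDivideAndConquer vs num)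

-- ===== LEMMAS AND PROOFS =====

-- the pairwise concatenation product
def pvMix (X Y : List String) : List String := X.flatMap (fun w => Y.map (fun v => w ++ v))

-- (num+1)-fold product of vs with itself
def pvPow (vs : List String) : Nat → List String
  | 0 => vs
  | (n+1) => pvMix (pvPow vs n) vs

lemma foldl_inner (Y : List String) (w : String) (t : List String) :
    Y.foldl (fun t v => t ++ [w ++ v]) t = t ++ Y.map (fun v => w ++ v) := by
  induction Y generalizing t with
  | nil => simp
  | cons y ys ih => simp [List.foldl, ih]

lemma foldl_mix (X Y : List String) (acc : List String) :
    X.foldl (fun t w => Y.foldl (fun t v => t ++ [w ++ v]) t) acc = acc ++ pvMix X Y := by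
  induction X generalizing acc with
  | nil => simp [pvMix]
  | cons x xs ih =>
      rw [List.foldl_cons, foldl_inner, ih]
      simp [pvMix, List.append_assoc]

lemma pvMix_assoc (X Y Z : List String) : pvMix (pvMix X Y) Z = pvMix X (pvMix Y Z) := by
  simp [pvMix, List.flatMap_assoc, List.map_eq_flatMap, String.append_assoc]

lemma pvMix_pow (vs : List String) (a b : Nat) :
    pvMix (pvPow vs a) (pvPow vs b) = pvPow vs (a + b + 1) := by
  induction b with
  | zero => rfl
  | succ b ih =>
      show pvMix (pvPow vs a) (pvMix (pvPow vs b) vs) = _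
      rw [← pvMix_assoc, ih]
      rfl

lemma tensorDCAux_eq_pow (vs : List String) : ∀ n, tensorDCAux vs n = pvPow vs n := by
  intro n
  induction n using Nat.strong_induction_on with
  | _ n ih =>
    match n with
    | 0 => simp [tensorDCAux, pvPow]
    | (m+1) =>
      rw [tensorDCAux]
      by_cases h : (m+1) % 2 = 1
      · simp only [h, beq_self_eq_true, if_true]
        rw [foldl_mix, ih ((m+1)/2) (by omega), List.nil_append, pvMix_pow]
        congr 1
        omega
      · have h2 : ((m+1) % 2 == 1) = false := by
          simp only [beq_eq_false_iff_ne]; exact h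
        rw [h2]
        simp only [Bool.false_eq_true, if_false]
        rw [ih ((m+1-1)/2) (by omega), foldl_mix, List.nil_append,
          foldl_mix, List.nil_append, pvMix_pow]
        rw [show pvMix (pvPow vs ((m+1-1)/2 + (m+1-1)/2 + 1)) vs
              = pvPow vs ((m+1-1)/2 + (m+1-1)/2 + 1 + 1) from rfl]
        congr 1
        omega

lemma alt_eq_pow (vs : List String) (n : Nat) :
    (List.range n).foldl
      (fun result _ => result.flatMap (fun w => vs.map (fun v => w ++ v)))
      (vs.map (fun v => v)) = pvPow vs n := by
  induction n with
  | zero => simp [pvPow]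
  | succ n ih =>
      rw [List.range_succ, List.foldl_append, ih]
      rfl

-- ===== VERDICT (by name: the statement is the Claim_ definition above) =====
theorem tensorDivideAndConquer_spec : Claim_equal_tensorDivideAndConquer := by
  intro vs num _ hpre
  unfold Spec_tensorDivideAndConquer tensorDivideAndConquer tensorDivideAndConquer_alt
  rw [tensorDCAux_eq_pow]
  by_cases h : num = 0
  · simp [h, pvPow]
  · have hne : (num == 0) = false := by simp [h]
    rw [hne, if_neg (by simp), alt_eq_pow]
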